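-- pv_equiv track=rewrite | github.com/Ming-1984/Ipmoney | scripts/merge-ui-screenshots.py | _layout_grid
-- ===== SOURCE A (Python) =====
-- def _layout_grid(sizes: list[tuple[int, int]], columns: int) -> tuple[list[int], list[int]]:
--     if columns <= 0:
--         raise ValueError("columns must be >= 1")
--
--     rows = (len(sizes) + columns - 1) // columns
--     col_widths = [0] * columns
--     row_heights = [0] * rows
--     for idx, (w, h) in enumerate(sizes):
--         row = idx // columns
--         col = idx % columns
--         col_widths[col] = max(col_widths[col], w)
--         row_heights[row] = max(row_heights[row], h)
--     return col_widths, row_heights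
-- ===== SOURCE B (Python) =====
-- def _layout_grid(sizes: list[tuple[int, int]], columns: int) -> tuple[list[int], list[int]]:
--     if columns <= 0:
--         raise ValueError("columns must be >= 1")
--
--     rows = []
--     rest = sizes
--     while rest:
--         rows.append(rest[:columns])
--         rest = rest[columns:]
--     row_heights = [max([0] + [h for _, h in row]) for row in rows]
--     col_widths = [max([0] + [row[c][0] for row in rows if c < len(row)])
--                   for c in range(columns)]
--     return col_widths, row_heights
-- ===== Notes on version B (the rewrite author's own statement) =====
-- stated objective: alternative
-- what changed: Replaces the flat enumerate+divmod pass that writes into preallocated width/height tables with an explicit split of sizes into row chunks, a per-chunk max for row heights, and a per-column-index max over the chunks (with 0 default) for column widths.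
import Mathlib
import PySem

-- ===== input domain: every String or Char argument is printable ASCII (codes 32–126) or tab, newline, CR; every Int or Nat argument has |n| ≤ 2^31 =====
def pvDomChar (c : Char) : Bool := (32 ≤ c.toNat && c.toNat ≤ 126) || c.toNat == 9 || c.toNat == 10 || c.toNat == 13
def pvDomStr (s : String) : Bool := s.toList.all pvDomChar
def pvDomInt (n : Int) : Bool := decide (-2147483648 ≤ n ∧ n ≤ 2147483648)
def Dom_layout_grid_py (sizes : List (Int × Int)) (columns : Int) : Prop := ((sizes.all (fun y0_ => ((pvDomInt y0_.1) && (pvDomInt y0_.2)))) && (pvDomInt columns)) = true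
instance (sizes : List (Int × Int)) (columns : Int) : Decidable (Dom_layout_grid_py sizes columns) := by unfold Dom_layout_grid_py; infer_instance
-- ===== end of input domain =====

-- B replaces A's flat enumerate+divmod pass over preallocated tables by row-chunk grouping with
-- per-chunk and per-column maxima (same cost, different decomposition); equivalence proved on columns ≥ 1.

-- ===== PORT A =====
-- loop body of A: col_widths[idx % columns] and row_heights[idx // columns] updates;
-- under Pre_ the indices are nonnegative and in range, so getD/set with .toNat are the exact Python reads/writes
def pvStepA (columns : Int) (st : List Int × List Int) (p : Int × (Int × Int)) : List Int × List Int :=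
  let row := PySem.Int.floordiv p.1 columns
  let col := PySem.Int.mod p.1 columns
  (st.1.set col.toNat (max (st.1.getD col.toNat 0) p.2.1),
   st.2.set row.toNat (max (st.2.getD row.toNat 0) p.2.2))

def layout_grid_py (sizes : List (Int × Int)) (columns : Int) : List Int × List Int :=
  -- Python raises ValueError for columns ≤ 0: those inputs are excluded by Pre_layout_grid_py
  let rows := PySem.Int.floordiv ((sizes.length : Int) + columns - 1) columns
  (PySem.List.enumerate sizes 0).foldl (pvStepA columns)
    (List.replicate columns.toNat 0, List.replicate rows.toNat 0)

-- ===== PORT B =====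
-- the while loop of B: rows.append(rest[:columns]); rest = rest[columns:]
def pvChunk (c : Nat) : List (Int × Int) → List (List (Int × Int))
  | [] => []
  | x :: xs => (x :: xs).take c :: pvChunk c (xs.drop (c - 1))
termination_by xs => xs.length
decreasing_by simp

def layout_grid_py_alt (sizes : List (Int × Int)) (columns : Int) : List Int × List Int :=
  let rows := pvChunk columns.toNat sizes
  -- max([0] + …): the list is nonempty, so the .getD default is never used
  let rowHeights := rows.map (fun row =>
    (PySem.List.max? ((0 : Int) :: row.map Prod.snd) (fun y => y)).getD 0)
  let colWidths := (List.range columns.toNat).map (fun j =>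
    (PySem.List.max? ((0 : Int) :: rows.filterMap (fun row => row[j]?.map Prod.fst)) (fun y => y)).getD 0)
  (colWidths, rowHeights)

-- ===== PRECONDITION & SPEC =====
-- Pre_ excludes exactly the inputs on which A raises ValueError (columns ≤ 0)
def Pre_layout_grid_py (_sizes : List (Int × Int)) (columns : Int) : Prop := 0 < columns
instance (sizes : List (Int × Int)) (columns : Int) : Decidable (Pre_layout_grid_py sizes columns) := by unfold Pre_layout_grid_py; infer_instance

def pvWitness_layout_grid_py : (List (Int × Int)) × Int := ([(3, 4), (1, 7), (5, 2)], 2)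

def Spec_layout_grid_py (sizes : List (Int × Int)) (columns : Int) (out : List Int × List Int) : Prop := out = layout_grid_py_alt sizes columns
instance (sizes : List (Int × Int)) (columns : Int) (out : List Int × List Int) : Decidable (Spec_layout_grid_py sizes columns out) := by unfold Spec_layout_grid_py; infer_instance

-- ===== CLAIM (what is proved, stated in full; the proofs are below) =====
def Claim_equal_layout_grid_py : Prop := ∀ (sizes : List (Int × Int)) (columns : Int), Dom_layout_grid_py sizes columns → Pre_layout_grid_py sizes columns → Spec_layout_grid_py sizes columns (layout_grid_py sizes columns)

-- ===== LEMMAS AND PROOFS =====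

-- Nat-indexed restatement of A's loop body
def pvStepN (c : Nat) (st : List Int × List Int) (p : (Int × Int) × Nat) : List Int × List Int :=
  (st.1.set (p.2 % c) (max (st.1.getD (p.2 % c) 0) p.1.1),
   st.2.set (p.2 / c) (max (st.2.getD (p.2 / c) 0) p.1.2))

def pvColStep (c j : Nat) (a : Int) (p : (Int × Int) × Nat) : Int :=
  if p.2 % c = j then max a p.1.1 else a

def pvRowStep (c r' : Nat) (a : Int) (p : (Int × Int) × Nat) : Int :=
  if p.2 / c = r' then max a p.1.2 else a

def pvColRow (j : Nat) (a : Int) (row : List (Int × Int)) : Int :=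
  match row[j]? with
  | some p => max a p.1
  | none => a

def pvRowH (a : Int) (row : List (Int × Int)) : Int :=
  row.foldl (fun a q => max a q.2) a

theorem pv_conv (c : Nat) (xs : List (Int × Int)) (s : Nat) (st : List Int × List Int) :
    List.foldl (pvStepA (c : Int)) st (PySem.List.enumerate xs (s : Int)) =
      List.foldl (pvStepN c) st (xs.zipIdx s) := by
  induction xs generalizing s st with
  | nil => simp [PySem.List.enumerate_nil]
  | cons x xs ih =>
    rw [PySem.List.enumerate_cons, List.zipIdx_cons, List.foldl_cons, List.foldl_cons]
    have hcast : ((s : Int) + 1) = ((s + 1 : Nat) : Int) := by push_cast; ring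
    rw [hcast, ih (s + 1)]
    congr 1
    simp only [pvStepA, pvStepN, PySem.Int.floordiv_natCast, PySem.Int.mod_natCast,
      Int.toNat_natCast]

theorem pv_len (c : Nat) (l : List ((Int × Int) × Nat)) (st : List Int × List Int) :
    (List.foldl (pvStepN c) st l).1.length = st.1.length ∧
      (List.foldl (pvStepN c) st l).2.length = st.2.length := by
  induction l generalizing st with
  | nil => simp
  | cons p l ih =>
    simp only [List.foldl_cons]
    have := ih (pvStepN c st p)
    simpa [pvStepN] using this

theorem pv_col (c : Nat) (l : List ((Int × Int) × Nat)) (st : List Int × List Int) (j : Nat)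
    (hj : j < st.1.length) :
    (List.foldl (pvStepN c) st l).1.getD j 0 =
      List.foldl (pvColStep c j) (st.1.getD j 0) l := by
  induction l generalizing st with
  | nil => simp
  | cons p l ih =>
    simp only [List.foldl_cons]
    rw [ih (pvStepN c st p) (by simp [pvStepN, hj])]
    congr 1
    simp only [pvStepN, pvColStep, List.getD_eq_getElem?_getD, List.getElem?_set]
    by_cases h : p.2 % c = j
    · simp [h, hj]
    · simp [h]

theorem pv_filterfold (j : Nat) (rows : List (List (Int × Int))) (a : Int) :
    List.foldl max a (rows.filterMap (fun row => row[j]?.map Prod.fst)) =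
      List.foldl (pvColRow j) a rows := by
  induction rows generalizing a with
  | nil => rfl
  | cons row rows ih =>
    cases h : row[j]? with
    | none => simp [h, pvColRow, ih]
    | some p => simp [h, pvColRow, ih]

theorem pv_row (c : Nat) (l : List ((Int × Int) × Nat)) (st : List Int × List Int) (r' : Nat)
    (H : ∀ p ∈ l, p.2 / c < st.2.length) :
    (List.foldl (pvStepN c) st l).2.getD r' 0 =
      List.foldl (pvRowStep c r') (st.2.getD r' 0) l := by
  induction l generalizing st with
  | nil => simp
  | cons p l ih =>
    simp only [List.foldl_cons]
    have hin : p.2 / c < st.2.length := H p (by simp)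
    rw [ih (pvStepN c st p) (by intro q hq; simpa [pvStepN] using H q (by simp [hq]))]
    congr 1
    simp only [pvStepN, pvRowStep, List.getD_eq_getElem?_getD, List.getElem?_set]
    by_cases h : p.2 / c = r'
    · simp [h, show r' < st.2.length from h ▸ hin]
    · simp [h]

theorem pvChunk_ne_nil (c : Nat) (hc : 0 < c) (xs : List (Int × Int)) (h : xs ≠ []) :
    pvChunk c xs = xs.take c :: pvChunk c (xs.drop c) := by
  cases xs with
  | nil => exact absurd rfl h
  | cons x t =>
    have : (x :: t).drop c = t.drop (c - 1) := by
      obtain ⟨c', rfl⟩ : ∃ c', c = c' + 1 := ⟨c - 1, by omega⟩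
      simp
    rw [pvChunk, ← this]

theorem pvChunk_len_aux (c : Nat) (hc : 0 < c) :
    ∀ (n : Nat) (xs : List (Int × Int)), xs.length ≤ n →
      (pvChunk c xs).length = (xs.length + c - 1) / c := by
  intro n
  induction n with
  | zero =>
    intro xs h
    have : xs = [] := List.eq_nil_of_length_eq_zero (by omega)
    subst this
    simp only [pvChunk, List.length_nil]
    exact (Nat.div_eq_of_lt (by omega)).symm
  | succ n ih =>
    intro xs h
    cases xs with
    | nil =>
      simp only [pvChunk, List.length_nil]
      exact (Nat.div_eq_of_lt (by omega)).symm
    | cons x t =>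
      have hlen : ((x :: t).drop c).length ≤ n := by
        simp only [List.length_drop, List.length_cons] at h ⊢; omega
      rw [pvChunk_ne_nil c hc _ (by simp), List.length_cons, ih _ hlen]
      simp only [List.length_drop, List.length_cons]
      by_cases hle : c ≤ t.length + 1
      · have h1 : t.length + 1 - c + c - 1 = t.length + 1 - c + (c - 1) := by omega
        have h2 : t.length + 1 + c - 1 = t.length + (c - 1) + 1 := by omega
        have h3 : t.length + 1 - c + (c - 1) + c = t.length + (c - 1) + 1 := by omega
        rw [h1, h2, ← h3, Nat.add_div_right _ hc]
      · have h0 : t.length + 1 - c = 0 := by omega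
        rw [h0]
        have h1 : (0 + c - 1) / c = 0 := Nat.div_eq_of_lt (by omega)
        have lo : 1 ≤ (t.length + 1 + c - 1) / c := (Nat.le_div_iff_mul_le hc).2 (by omega)
        have hi : (t.length + 1 + c - 1) / c < 2 := Nat.div_lt_of_lt_mul (by omega)
        omega

theorem pvChunk_len (c : Nat) (hc : 0 < c) (xs : List (Int × Int)) :
    (pvChunk c xs).length = (xs.length + c - 1) / c :=
  pvChunk_len_aux c hc xs.length xs le_rfl

theorem pv_colchunk (c j : Nat) (hj : j < c) (row : List (Int × Int))
    (r t : Nat) (a : Int) (hlen : t + row.length ≤ c) :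
    List.foldl (pvColStep c j) a (row.zipIdx (r * c + t)) =
      (match (if t ≤ j then row[j - t]? else none) with
        | some p => max a p.1
        | none => a) := by
  induction row generalizing t a with
  | nil => simp
  | cons q row ih =>
    rw [List.zipIdx_cons, List.foldl_cons]
    have ht : t < c := by simp at hlen; omega
    have hmod : (r * c + t) % c = t := by
      rw [Nat.add_comm, Nat.add_mul_mod_self_right, Nat.mod_eq_of_lt ht]
    have harith : r * c + t + 1 = r * c + (t + 1) := by omega
    rw [harith] at *
    by_cases h : t = j
    · subst h
      have h1 : pvColStep c t a (q, r * c + t) = max a q.1 := by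
        simp [pvColStep, hmod]
      rw [h1, ih (t + 1) (max a q.1) (by simp at hlen ⊢; omega)]
      simp
    · have h1 : pvColStep c j a (q, r * c + t) = a := by
        simp [pvColStep, hmod, h]
      rw [h1, ih (t + 1) a (by simp at hlen ⊢; omega)]
      by_cases h2 : t ≤ j
      · have h3 : t + 1 ≤ j := by omega
        have h4 : j - t = (j - (t + 1)) + 1 := by omega
        simp [h2, h3, h4]
      · simp [h2, show ¬ (t + 1 ≤ j) by omega]

theorem pv_rowchunk (c r' : Nat) (hc : 0 < c) (row : List (Int × Int))
    (r t : Nat) (a : Int) (hlen : t + row.length ≤ c) :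
    List.foldl (pvRowStep c r') a (row.zipIdx (r * c + t)) =
      if r' = r then pvRowH a row else a := by
  induction row generalizing t a with
  | nil => simp [pvRowH]
  | cons q row ih =>
    rw [List.zipIdx_cons, List.foldl_cons]
    have ht : t < c := by simp at hlen; omega
    have hdiv : (r * c + t) / c = r := by
      rw [Nat.add_comm, Nat.add_mul_div_right _ _ hc, Nat.div_eq_of_lt ht]; omega
    have harith : r * c + t + 1 = r * c + (t + 1) := by omega
    rw [harith]
    by_cases h : r' = r
    · have h1 : pvRowStep c r' a (q, r * c + t) = max a q.2 := by
        simp [pvRowStep, hdiv, h]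
      rw [h1, ih (t + 1) (max a q.2) (by simp at hlen ⊢; omega)]
      simp [h, pvRowH]
    · have h1 : pvRowStep c r' a (q, r * c + t) = a := by
        simp [pvRowStep, hdiv, Ne.symm h]
      rw [h1, ih (t + 1) a (by simp at hlen ⊢; omega)]
      simp [h]

theorem pv_col2_aux (c j : Nat) (hc : 0 < c) (hj : j < c) :
    ∀ (n : Nat) (xs : List (Int × Int)), xs.length ≤ n → ∀ (r : Nat) (a : Int),
      List.foldl (pvColStep c j) a (xs.zipIdx (r * c)) =
        List.foldl (pvColRow j) a (pvChunk c xs) := by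
  intro n
  induction n with
  | zero =>
    intro xs h r a
    have : xs = [] := List.eq_nil_of_length_eq_zero (by omega)
    subst this; simp [pvChunk]
  | succ n ih =>
    intro xs h r a
    rcases List.eq_nil_or_concat' xs with rfl | _
    · simp [pvChunk]
    · have hne : xs ≠ [] := by rename_i hx; rcases hx with ⟨_, _, rfl⟩; simp
      rw [show xs.zipIdx (r * c) = (xs.take c ++ xs.drop c).zipIdx (r * c) by
            rw [List.take_append_drop],
          List.zipIdx_append, List.foldl_append,
          pvChunk_ne_nil c hc xs hne, List.foldl_cons]
      have htake : List.foldl (pvColStep c j) a ((xs.take c).zipIdx (r * c)) =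
          pvColRow j a (xs.take c) := by
        have := pv_colchunk c j hj (xs.take c) r 0 a (by simp)
        simpa [pvColRow] using this
      rw [htake]
      by_cases hcle : c ≤ xs.length
      · have hlen2 : (xs.drop c).length ≤ n := by
          simp only [List.length_drop]
          have : 0 < xs.length := List.length_pos_of_ne_nil hne
          omega
        have hstart : r * c + (xs.take c).length = (r + 1) * c := by
          simp [List.length_take, Nat.min_eq_left hcle]; ring
        rw [hstart, ih _ hlen2 (r + 1)]
      · have hdrop : xs.drop c = [] := by
          rw [List.drop_eq_nil_iff]; omega
        rw [hdrop]
        simp [pvChunk]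

theorem pv_row2_aux (c r' : Nat) (hc : 0 < c) :
    ∀ (n : Nat) (xs : List (Int × Int)), xs.length ≤ n → ∀ (r : Nat) (a : Int),
      List.foldl (pvRowStep c r') a (xs.zipIdx (r * c)) =
        (match (if r ≤ r' then (pvChunk c xs)[r' - r]? else none) with
          | some row => pvRowH a row
          | none => a) := by
  intro n
  induction n with
  | zero =>
    intro xs h r a
    have : xs = [] := List.eq_nil_of_length_eq_zero (by omega)
    subst this
    cases hle : decide (r ≤ r') <;> simp_all [pvChunk]
  | succ n ih =>
    intro xs h r a
    rcases List.eq_nil_or_concat' xs with rfl | _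
    · cases hle : decide (r ≤ r') <;> simp_all [pvChunk]
    · have hne : xs ≠ [] := by rename_i hx; rcases hx with ⟨_, _, rfl⟩; simp
      rw [show xs.zipIdx (r * c) = (xs.take c ++ xs.drop c).zipIdx (r * c) by
            rw [List.take_append_drop],
          List.zipIdx_append, List.foldl_append,
          pvChunk_ne_nil c hc xs hne]
      have htake : List.foldl (pvRowStep c r') a ((xs.take c).zipIdx (r * c)) =
          if r' = r then pvRowH a (xs.take c) else a := by
        have := pv_rowchunk c r' hc (xs.take c) r 0 a (by simp)
        simpa using this
      rw [htake]
      have hrest : ∀ (b : Int), List.foldl (pvRowStep c r') b ((xs.drop c).zipIdx (r * c + (xs.take c).length)) =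
          (match (if r + 1 ≤ r' then (pvChunk c (xs.drop c))[r' - (r + 1)]? else none) with
            | some row => pvRowH b row
            | none => b) := by
        intro b
        by_cases hcle : c ≤ xs.length
        · have hlen2 : (xs.drop c).length ≤ n := by
            simp only [List.length_drop]
            have : 0 < xs.length := List.length_pos_of_ne_nil hne
            omega
          have hstart : r * c + (xs.take c).length = (r + 1) * c := by
            simp [List.length_take, Nat.min_eq_left hcle]; ring
          rw [hstart, ih _ hlen2 (r + 1)]
        · have hdrop : xs.drop c = [] := by
            rw [List.drop_eq_nil_iff]; omega
          rw [hdrop]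
          cases hle : decide (r + 1 ≤ r') <;> simp_all [pvChunk]
      by_cases h1 : r' = r
      · subst h1
        rw [if_pos rfl, hrest]
        simp [show ¬ (r' + 1 ≤ r') by omega]
      · rw [if_neg h1, hrest]
        by_cases h2 : r ≤ r'
        · have h3 : r + 1 ≤ r' := by omega
          have h4 : r' - r = (r' - (r + 1)) + 1 := by omega
          simp [h2, h3, h4]
        · simp [h2, show ¬ (r + 1 ≤ r') by omega]

theorem layout_grid_py_spec : Claim_equal_layout_grid_py := by
  intro sizes columns hdom hpre
  unfold Spec_layout_grid_py layout_grid_py layout_grid_py_alt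
  dsimp only
  have hpre' : (0 : Int) < columns := hpre
  have hc : 0 < columns.toNat := by omega
  have hcol : columns = (columns.toNat : Int) := by omega
  set c := columns.toNat with hcdef
  set n := sizes.length with hndef
  -- the number of rows
  have hrow : (PySem.Int.floordiv ((n : Int) + columns - 1) columns).toNat = (n + c - 1) / c := by
    rw [hcol, show ((n : Int) + (c : Int) - 1) = ((n + c - 1 : Nat) : Int) by omega,
      PySem.Int.floordiv_natCast, Int.toNat_natCast]
  set R := (n + c - 1) / c with hRdef
  rw [hrow]
  set st0 : List Int × List Int := (List.replicate c 0, List.replicate R 0) with hst0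
  have hfold : (PySem.List.enumerate sizes 0).foldl (pvStepA columns) st0 =
      List.foldl (pvStepN c) st0 (sizes.zipIdx 0) := by
    rw [hcol, show (0 : Int) = ((0 : Nat) : Int) by simp, pv_conv c sizes 0 st0]
  set F := List.foldl (pvStepN c) st0 (sizes.zipIdx 0) with hF
  rw [hfold]
  have hlen1 : F.1.length = c := by
    rw [hF, (pv_len c _ st0).1, hst0]; simp
  have hlen2 : F.2.length = R := by
    rw [hF, (pv_len c _ st0).2, hst0]; simp
  have hchlen : (pvChunk c sizes).length = R := pvChunk_len c hc sizes
  refine Prod.ext ?_ ?_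
  · -- column widths
    apply List.ext_getElem?
    intro i
    by_cases hi : i < c
    · have hgd : F.1[i]? = some (F.1.getD i 0) := by
        rw [List.getElem?_eq_getElem (by omega), List.getD_eq_getElem?_getD,
          List.getElem?_eq_getElem (by omega)]; rfl
      have hA : F.1.getD i 0 = List.foldl (pvColRow i) 0 (pvChunk c sizes) := by
        rw [hF, pv_col c _ st0 i (by rw [hst0]; simpa using hi)]
        have h0 : st0.1.getD i 0 = 0 := by rw [hst0]; exact List.getD_replicate _ hi
        rw [h0, show (0 : Nat) = 0 * c by ring, pv_col2_aux c i hc hi n sizes le_rfl 0 0]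
      rw [hgd, hA]
      rw [List.getElem?_map, List.getElem?_range hi]
      simp only [Option.map_some]
      congr 1
      rw [PySem.List.max?_id_cons, Option.getD_some, pv_filterfold]
    · rw [List.getElem?_eq_none (by omega), List.getElem?_eq_none (by simp; omega)]
  · -- row heights
    apply List.ext_getElem?
    intro r'
    by_cases hr : r' < R
    · have hgd : F.2[r']? = some (F.2.getD r' 0) := by
        rw [List.getElem?_eq_getElem (by omega), List.getD_eq_getElem?_getD,
          List.getElem?_eq_getElem (by omega)]; rfl
      have hH : ∀ p ∈ sizes.zipIdx 0, p.2 / c < st0.2.length := by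
        intro p hp
        obtain ⟨⟨x, k⟩, rfl⟩ : ∃ q : (Int × Int) × Nat, q = p := ⟨p, rfl⟩
        have hk := List.mem_zipIdx hp
        have hkn : k < n := by omega
        have e1 : R = (n - 1) / c + 1 := by
          rw [hRdef, show n + c - 1 = (n - 1) + c by omega, Nat.add_div_right _ hc]
        have e2 : k / c ≤ (n - 1) / c := Nat.div_le_div_right (by omega)
        rw [hst0]; simp only [List.length_replicate]
        omega
      have hA : F.2.getD r' 0 =
          (match (pvChunk c sizes)[r']? with
            | some row => pvRowH 0 row
            | none => (0 : Int)) := by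
        rw [hF, pv_row c _ st0 r' hH]
        have h0 : st0.2.getD r' 0 = 0 := by rw [hst0]; exact List.getD_replicate _ hr
        rw [h0, show (0 : Nat) = 0 * c by ring, pv_row2_aux c r' hc n sizes le_rfl 0 0]
        simp
      obtain ⟨row, hrow'⟩ : ∃ row, (pvChunk c sizes)[r']? = some row :=
        ⟨(pvChunk c sizes)[r']'(by omega), List.getElem?_eq_getElem (by omega)⟩
      rw [hgd, hA, hrow', List.getElem?_map, hrow']
      simp only [Option.map_some]
      congr 1
      rw [PySem.List.max?_id_cons, Option.getD_some, List.foldl_map]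
      rfl
    · rw [List.getElem?_eq_none (by omega), List.getElem?_eq_none (by simp [hchlen]; omega)]
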